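-- pv_equiv track=rewrite | github.com/muhstefan/EORA | giga.py | build_context_from_results
-- ===== SOURCE A (Python) =====
-- def build_context_from_results(final_results):
--     unique_urls = []
--     url_to_num = {}
--
--     for item in final_results:
--         url = item.get('url', '')
--         if url and url not in url_to_num:
--             url_to_num[url] = len(unique_urls) + 1
--             unique_urls.append(url)
--
--     blocks_text = []
--     for item in final_results:
--         url = item.get('url', '')
--         ref_num = url_to_num.get(url, None)
--         ref_str = f"[{ref_num}]" if ref_num is not None else ""
--         text = item['block_text'].strip()
--         blocks_text.append(f"{text} {ref_str}")
--
--     sources_lines = [f"[{i + 1}] {url}" for i, url in enumerate(unique_urls)]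
--     sources_text = "Источники информации:\n" + "\n".join(sources_lines) + "\n\n"
--     context = sources_text + "\n\n".join(blocks_text)
--     return context
-- ===== SOURCE B (Python) =====
-- def build_context_from_results(final_results):
--     url_to_num = {}
--     blocks_text = []
--     for item in final_results:
--         url = item.get('url', '')
--         text = item['block_text'].strip()
--         if url:
--             n = url_to_num.setdefault(url, len(url_to_num) + 1)
--             blocks_text.append(f"{text} [{n}]")
--         else:
--             blocks_text.append(f"{text} ")
--     sources_lines = [f"[{n}] {u}" for u, n in url_to_num.items()]
--     return ("Источники информации:\n" + "\n".join(sources_lines) + "\n\n"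
--             + "\n\n".join(blocks_text))
-- ===== Notes on version B (the rewrite author's own statement) =====
-- stated objective: simpler
-- what changed: B fuses A's two sequential passes into a single loop that registers each url via setdefault and emits its text block in the same iteration, dropping the separate unique_urls list and index-building pre-pass; source lines come straight from url_to_num.items().
import Mathlib
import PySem

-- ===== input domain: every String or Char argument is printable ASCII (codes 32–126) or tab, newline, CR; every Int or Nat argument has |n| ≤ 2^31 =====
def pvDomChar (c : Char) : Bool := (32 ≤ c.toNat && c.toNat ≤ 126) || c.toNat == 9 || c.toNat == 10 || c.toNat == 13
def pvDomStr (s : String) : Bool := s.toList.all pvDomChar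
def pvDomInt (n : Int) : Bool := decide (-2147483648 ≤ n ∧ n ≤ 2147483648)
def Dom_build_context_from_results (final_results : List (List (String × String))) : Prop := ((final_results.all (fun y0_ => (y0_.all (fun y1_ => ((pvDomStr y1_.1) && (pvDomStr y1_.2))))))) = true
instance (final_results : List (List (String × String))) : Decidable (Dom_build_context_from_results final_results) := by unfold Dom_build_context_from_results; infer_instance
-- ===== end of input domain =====

-- ===== PORT A =====
-- B fuses A's two passes into one; proved equal where every item has a 'block_text' key (A raises KeyError otherwise).
-- shared accessors: item.get('url', '') and item['block_text'].strip() (total via getD ""; exact inside Pre_)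
def pyGetUrl (item : List (String × String)) : String := (PySem.Dict.mk item).getD "url" ""
def pyGetText (item : List (String × String)) : String :=
  PySem.Str.strip (((PySem.Dict.mk item).get? "block_text").getD "")

-- first pass of A: collect unique urls and number them by first appearance
def stepA (st : List String × PySem.Dict String Int) (item : List (String × String)) :
    List String × PySem.Dict String Int :=
  if pyGetUrl item ≠ "" ∧ st.2.contains (pyGetUrl item) = false then
    (st.1 ++ [pyGetUrl item], st.2.insert (pyGetUrl item) ((st.1.length : Int) + 1))
  else st

def build_context_from_results (final_results : List (List (String × String))) : String :=
  let p := final_results.foldl stepA ([], PySem.Dict.empty)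
  let blocks_text := final_results.foldl (fun acc item =>
      let ref_str := match p.2.get? (pyGetUrl item) with
        | some n => "[" ++ PySem.Int.toStr n ++ "]"
        | none => ""
      acc ++ [pyGetText item ++ " " ++ ref_str]) ([] : List String)
  let sources_lines := (PySem.List.enumerate p.1 0).map
      (fun q => "[" ++ PySem.Int.toStr (q.1 + 1) ++ "] " ++ q.2)
  "Источники информации:\n" ++ PySem.Str.join "\n" sources_lines ++ "\n\n"
    ++ PySem.Str.join "\n\n" blocks_text

-- ===== PORT B =====
-- single pass: register the url (setdefault) and emit the block in the same iteration
def stepB (st : PySem.Dict String Int × List String) (item : List (String × String)) :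
    PySem.Dict String Int × List String :=
  if pyGetUrl item ≠ "" then
    match st.1.get? (pyGetUrl item) with   -- n = url_to_num.setdefault(url, len(url_to_num) + 1)
    | some n => (st.1, st.2 ++ [pyGetText item ++ " [" ++ PySem.Int.toStr n ++ "]"])
    | none =>
        (st.1.insert (pyGetUrl item) ((st.1.size : Int) + 1),
         st.2 ++ [pyGetText item ++ " [" ++ PySem.Int.toStr ((st.1.size : Int) + 1) ++ "]"])
  else (st.1, st.2 ++ [pyGetText item ++ " "])

def build_context_from_results_alt (final_results : List (List (String × String))) : String :=
  let p := final_results.foldl stepB (PySem.Dict.empty, [])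
  let sources_lines := p.1.items.map (fun q => "[" ++ PySem.Int.toStr q.2 ++ "] " ++ q.1)
  "Источники информации:\n" ++ PySem.Str.join "\n" sources_lines ++ "\n\n"
    ++ PySem.Str.join "\n\n" p.2

-- ===== PRECONDITION & SPEC =====
-- A (and B) raise KeyError on an item without a 'block_text' key; exactly those inputs are excluded.
def Pre_build_context_from_results (final_results : List (List (String × String))) : Prop :=
  (final_results.all (fun item => (PySem.Dict.mk item).contains "block_text")) = true
instance (final_results : List (List (String × String))) : Decidable (Pre_build_context_from_results final_results) := by unfold Pre_build_context_from_results; infer_instance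
def pvWitness_build_context_from_results : (List (List (String × String))) :=
  [[("block_text", " hello "), ("url", "http://a")], [("block_text", "x")],
   [("block_text", "y"), ("url", "http://a")]]
def Spec_build_context_from_results (final_results : List (List (String × String))) (out : String) : Prop := out = build_context_from_results_alt final_results
instance (final_results : List (List (String × String))) (out : String) : Decidable (Spec_build_context_from_results final_results out) := by unfold Spec_build_context_from_results; infer_instance

-- ===== CLAIM (what is proved, stated in full; the proofs are below) =====
def Claim_equal_build_context_from_results : Prop := ∀ (final_results : List (List (String × String))), Dom_build_context_from_results final_results → Pre_build_context_from_results final_results → Spec_build_context_from_results final_results (build_context_from_results final_results)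

-- ===== LEMMAS AND PROOFS =====

-- the block A's second pass builds for one item, given the final numbering dict
def blockFn (D : PySem.Dict String Int) (item : List (String × String)) : String :=
  pyGetText item ++ " " ++ (match D.get? (pyGetUrl item) with
    | some n => "[" ++ PySem.Int.toStr n ++ "]"
    | none => "")

-- invariant tying A's pair (unique_urls, url_to_num) together
def InvBC (d : PySem.Dict String Int) (us : List String) : Prop :=
  d.items = (PySem.List.enumerate us 1).map (fun p => (p.2, p.1)) ∧ ("" : String) ∉ us

lemma block_merge (t : String) (n : Int) :
    t ++ " " ++ ("[" ++ PySem.Int.toStr n ++ "]") = t ++ " [" ++ PySem.Int.toStr n ++ "]" := by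
  have h : (" " : String) ++ "[" = " [" := by decide
  simp only [String.append_assoc]
  rw [← String.append_assoc (s₁ := " ") (s₂ := "["), h]

lemma keys_of_inv (d : PySem.Dict String Int) (us : List String) (h : InvBC d us) :
    d.keys = us := by
  simp only [PySem.Dict.keys, h.1, List.map_map]
  have hc : ((fun (x : String × Int) => x.1) ∘ (fun (p : Int × String) => (p.2, p.1)))
      = (fun (p : Int × String) => p.2) := rfl
  rw [hc]
  exact PySem.List.map_snd_enumerate us 1

lemma size_of_inv (d : PySem.Dict String Int) (us : List String) (h : InvBC d us) :
    d.size = us.length := by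
  simp only [PySem.Dict.size, h.1, List.length_map, PySem.List.length_enumerate]

lemma get?_empty_of_inv (d : PySem.Dict String Int) (us : List String) (h : InvBC d us) :
    d.get? "" = none := by
  rw [PySem.Dict.get?_eq_none_iff_not_mem_keys, keys_of_inv d us h]
  exact h.2

-- A's first-pass dict only grows: established lookups survive the rest of the fold
lemma monoA : ∀ (fr : List (List (String × String))) (st : List String × PySem.Dict String Int)
    (u : String) (n : Int), st.2.get? u = some n →
    (List.foldl stepA st fr).2.get? u = some n := by
  intro fr
  induction fr with
  | nil => intro st u n h; simpa using h
  | cons item rest ih =>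
    intro st u n h
    simp only [List.foldl_cons]
    apply ih
    by_cases hcnd : pyGetUrl item ≠ "" ∧ st.2.contains (pyGetUrl item) = false
    · have hne : u ≠ pyGetUrl item := by
        intro he
        have hc := hcnd.2
        rw [← he, PySem.Dict.contains_eq_isSome_get?, h] at hc
        simp at hc
      unfold stepA
      rw [if_pos hcnd]
      simpa [PySem.Dict.get?_insert, hne] using h
    · unfold stepA
      rw [if_neg hcnd]
      exact h

lemma inv_empty : InvBC PySem.Dict.empty [] := by
  constructor
  · rfl
  · simp

-- the fusion lemma: from any related state, B's single fold produces A's final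
-- dict together with A's second-pass blocks
lemma mainBC : ∀ (fr : List (List (String × String))) (us : List String)
    (d : PySem.Dict String Int) (bs : List String), InvBC d us →
    InvBC (List.foldl stepA (us, d) fr).2 (List.foldl stepA (us, d) fr).1 ∧
    List.foldl stepB (d, bs) fr =
      ((List.foldl stepA (us, d) fr).2,
        bs ++ fr.map (blockFn (List.foldl stepA (us, d) fr).2)) := by
  intro fr
  induction fr with
  | nil => intro us d bs h; exact ⟨h, by simp⟩
  | cons item rest ih =>
    intro us d bs h
    simp only [List.foldl_cons, List.map_cons]
    by_cases hu : pyGetUrl item = ""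
    · -- empty url: both states unchanged, block gets no reference
      have hA : stepA (us, d) item = (us, d) := by
        unfold stepA; simp [hu]
      have hB : stepB (d, bs) item = (d, bs ++ [pyGetText item ++ " "]) := by
        unfold stepB; simp [hu]
      obtain ⟨hinv, hfold⟩ := ih us d (bs ++ [pyGetText item ++ " "]) h
      rw [hA, hB, hfold]
      refine ⟨hinv, ?_⟩
      have hnone : (List.foldl stepA (us, d) rest).2.get? (pyGetUrl item) = none := by
        rw [hu]; exact get?_empty_of_inv _ _ hinv
      have hblk : blockFn (List.foldl stepA (us, d) rest).2 item = pyGetText item ++ " " := by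
        unfold blockFn; rw [hnone]; simp
      rw [hblk, List.append_assoc]; rfl
    · by_cases hc : d.contains (pyGetUrl item) = true
      · -- url already numbered: both states unchanged
        obtain ⟨n, hn⟩ : ∃ n, d.get? (pyGetUrl item) = some n := by
          rw [PySem.Dict.contains_eq_isSome_get?] at hc
          exact Option.isSome_iff_exists.mp hc
        have hA : stepA (us, d) item = (us, d) := by
          unfold stepA; simp [hc]
        have hB : stepB (d, bs) item =
            (d, bs ++ [pyGetText item ++ " [" ++ PySem.Int.toStr n ++ "]"]) := by
          unfold stepB; simp [hu, hn]
        obtain ⟨hinv, hfold⟩ :=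
          ih us d (bs ++ [pyGetText item ++ " [" ++ PySem.Int.toStr n ++ "]"]) h
        rw [hA, hB, hfold]
        refine ⟨hinv, ?_⟩
        have hfin : (List.foldl stepA (us, d) rest).2.get? (pyGetUrl item) = some n :=
          monoA rest (us, d) _ n hn
        have hblk : blockFn (List.foldl stepA (us, d) rest).2 item =
            pyGetText item ++ " [" ++ PySem.Int.toStr n ++ "]" := by
          unfold blockFn
          rw [hfin]
          exact block_merge (pyGetText item) n
        rw [hblk, List.append_assoc]; rfl
      · -- fresh url: both insert it with number |unique_urls| + 1
        simp only [Bool.not_eq_true] at hc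
        have hn : d.get? (pyGetUrl item) = none :=
          (PySem.Dict.get?_eq_none_iff_contains d _).mpr hc
        have hA : stepA (us, d) item =
            (us ++ [pyGetUrl item], d.insert (pyGetUrl item) ((us.length : Int) + 1)) := by
          unfold stepA; simp [hu, hc]
        have hsz : (d.size : Int) + 1 = (us.length : Int) + 1 := by
          rw [size_of_inv d us h]
        have hB : stepB (d, bs) item =
            (d.insert (pyGetUrl item) ((us.length : Int) + 1),
             bs ++ [pyGetText item ++ " [" ++ PySem.Int.toStr ((us.length : Int) + 1) ++ "]"]) := by
          unfold stepB; rw [if_pos hu, hn]; simp [hsz]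
        have hinv' : InvBC (d.insert (pyGetUrl item) ((us.length : Int) + 1))
            (us ++ [pyGetUrl item]) := by
          constructor
          · rw [PySem.Dict.items_insert_of_not_contains d _ hc, h.1,
              PySem.List.enumerate_append]
            simp [PySem.List.enumerate_cons]
            omega
          · intro hmem
            rcases List.mem_append.mp hmem with h1 | h1
            · exact h.2 h1
            · simp at h1; exact hu h1
        obtain ⟨hinv, hfold⟩ := ih (us ++ [pyGetUrl item])
          (d.insert (pyGetUrl item) ((us.length : Int) + 1))
          (bs ++ [pyGetText item ++ " [" ++ PySem.Int.toStr ((us.length : Int) + 1) ++ "]"]) hinv'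
        rw [hA, hB, hfold]
        refine ⟨hinv, ?_⟩
        have hfin : (List.foldl stepA (us ++ [pyGetUrl item],
            d.insert (pyGetUrl item) ((us.length : Int) + 1)) rest).2.get? (pyGetUrl item)
            = some ((us.length : Int) + 1) := by
          apply monoA
          exact PySem.Dict.get?_insert_self _ _ _
        have hblk : blockFn (List.foldl stepA (us ++ [pyGetUrl item],
            d.insert (pyGetUrl item) ((us.length : Int) + 1)) rest).2 item =
            pyGetText item ++ " [" ++ PySem.Int.toStr ((us.length : Int) + 1) ++ "]" := by
          unfold blockFn
          rw [hfin]
          exact block_merge (pyGetText item) _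
        rw [hblk, List.append_assoc]; rfl

-- A's second pass is a map with the final dict
lemma foldl_blocks (D : PySem.Dict String Int) :
    ∀ (fr : List (List (String × String))) (acc : List String),
    List.foldl (fun acc item =>
      let ref_str := match D.get? (pyGetUrl item) with
        | some n => "[" ++ PySem.Int.toStr n ++ "]"
        | none => ""
      acc ++ [pyGetText item ++ " " ++ ref_str]) acc fr = acc ++ fr.map (blockFn D) := by
  intro fr
  induction fr with
  | nil => intro acc; simp
  | cons item rest ih =>
    intro acc
    simp only [List.foldl_cons, List.map_cons, ih]
    rw [List.append_assoc]
    rfl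

-- the numbered source lines agree: enumerate from 0 with i+1 = the stored numbers
lemma enum_shift : ∀ (us : List String) (s : Int),
    (PySem.List.enumerate us (s + 1)).map
        (fun p => "[" ++ PySem.Int.toStr p.1 ++ "] " ++ p.2) =
    (PySem.List.enumerate us s).map
        (fun q => "[" ++ PySem.Int.toStr (q.1 + 1) ++ "] " ++ q.2) := by
  intro us
  induction us with
  | nil => intro s; simp [PySem.List.enumerate_nil]
  | cons u rest ih =>
    intro s
    rw [PySem.List.enumerate_cons, PySem.List.enumerate_cons]
    simp only [List.map_cons]
    rw [ih (s + 1)]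

-- ===== VERDICT (by name: the statement is the Claim_ definition above) =====
theorem build_context_from_results_spec : Claim_equal_build_context_from_results := by
  intro fr _ _
  unfold Spec_build_context_from_results build_context_from_results build_context_from_results_alt
  obtain ⟨hinv, hfold⟩ := mainBC fr [] PySem.Dict.empty [] inv_empty
  simp only [hfold, foldl_blocks]
  have hsrc : (List.foldl stepA ([], PySem.Dict.empty) fr).2.items.map
      (fun q => "[" ++ PySem.Int.toStr q.2 ++ "] " ++ q.1) =
      (PySem.List.enumerate (List.foldl stepA ([], PySem.Dict.empty) fr).1 0).map
      (fun q => "[" ++ PySem.Int.toStr (q.1 + 1) ++ "] " ++ q.2) := by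
    rw [hinv.1, List.map_map]
    have hcmp : ((fun (q : String × Int) => "[" ++ PySem.Int.toStr q.2 ++ "] " ++ q.1) ∘
        (fun (p : Int × String) => (p.2, p.1))) =
        (fun (p : Int × String) => "[" ++ PySem.Int.toStr p.1 ++ "] " ++ p.2) := rfl
    rw [hcmp]
    have hs := enum_shift (List.foldl stepA ([], PySem.Dict.empty) fr).1 0
    norm_num at hs
    rw [hs]
  rw [hsrc]
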